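-- pv_equiv track=rewrite | github.com/kckoh/xflow | spark/jobs/kafka_streaming_runner.py | _escape_at_identifiers
-- ===== SOURCE A (Python) =====
-- def _normalize_identifiers(query: str) -> str:
--     """Replace double quotes with backticks for identifiers outside strings."""
--     if not query or '"' not in query:
--         return query
--
--     # Split by single quotes to avoid touching string literals
--     parts = query.split("'")
--     for i in range(0, len(parts), 2):
--         # In non-string segments, replace " with `
--         parts[i] = parts[i].replace('"', '`')
--     return "'".join(parts)
--
-- def _escape_at_identifiers(query: str) -> str:
--     if not query or ("@" not in query and '"' not in query):
--         return query
--
--     # Normalize double quotes to backticks first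
--     query = _normalize_identifiers(query)
--
--     parts = query.split("'")
--     for i in range(0, len(parts), 2):
--         parts[i] = __escape_at_identifiers_segment(parts[i])
--     return "'".join(parts)
--
-- def __escape_at_identifiers_segment(segment: str) -> str:
--     out = []
--     i = 0
--     while i < len(segment):
--         if segment[i] == "`":
--             end = segment.find("`", i + 1)
--             if end == -1:
--                 out.append(segment[i:])
--                 break
--             out.append(segment[i:end + 1])
--             i = end + 1
--             continue
--
--         if segment[i] == "@":
--             j = i + 1
--             while j < len(segment) and (segment[j].isalnum() or segment[j] == "_"):
--                 j += 1
--             if j > i + 1: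
--                 out.append("`")
--                 out.append(segment[i:j])
--                 out.append("`")
--                 i = j
--                 continue
--         out.append(segment[i])
--         i += 1
--     return "".join(out)
-- ===== SOURCE B (Python) =====
-- def _escape_at_identifiers(query: str) -> str:
--     # Single left-to-right scan with a 3-state mode machine (normal / single-quote
--     # string / backtick span) instead of A's split-replace-join multi-pass pipeline.
--     if not query or ("@" not in query and '"' not in query):
--         return query
--     out = []
--     n = len(query)
--     i = 0
--     mode = 0  # 0 = normal, 1 = inside '...' string, 2 = inside backtick span
--     while i < n:
--         c = query[i]
--         if mode == 0:
--             if c == "'":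
--                 out.append(c)
--                 mode = 1
--                 i += 1
--             elif c == '"' or c == "`":
--                 out.append("`")
--                 mode = 2
--                 i += 1
--             elif c == "@":
--                 j = i + 1
--                 while j < n and (query[j].isalnum() or query[j] == "_"):
--                     j += 1
--                 if j > i + 1:
--                     out.append("`")
--                     out.append(query[i:j])
--                     out.append("`")
--                     i = j
--                 else:
--                     out.append(c)
--                     i += 1
--             else:
--                 out.append(c)
--                 i += 1
--         elif mode == 1:
--             out.append(c)
--             if c == "'":
--                 mode = 0
--             i += 1
--         else:  # mode == 2
--             if c == "'":
--                 out.append(c)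
--                 mode = 1
--             elif c == '"' or c == "`":
--                 out.append("`")
--                 mode = 0
--             else:
--                 out.append(c)
--             i += 1
--     return "".join(out)
-- ===== Notes on version B (the rewrite author's own statement) =====
-- stated objective: alternative
-- what changed: Replaced A's multi-pass pipeline (normalize quotes via split/replace/join, then split on single quotes again and escape @-identifiers segment by segment) with a single left-to-right scan of the whole query driven by a 3-state mode machine (normal / inside-string / inside-backtick-span).
import Mathlib
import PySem

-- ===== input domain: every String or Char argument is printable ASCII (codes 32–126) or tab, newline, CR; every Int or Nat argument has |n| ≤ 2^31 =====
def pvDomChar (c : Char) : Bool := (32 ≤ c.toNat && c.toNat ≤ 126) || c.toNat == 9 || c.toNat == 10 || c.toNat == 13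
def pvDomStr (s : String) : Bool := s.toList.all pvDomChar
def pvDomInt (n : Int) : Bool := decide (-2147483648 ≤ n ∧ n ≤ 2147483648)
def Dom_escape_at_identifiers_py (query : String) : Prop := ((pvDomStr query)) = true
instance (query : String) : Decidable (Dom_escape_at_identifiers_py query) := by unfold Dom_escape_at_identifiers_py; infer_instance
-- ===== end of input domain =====

-- B replaces A's split/replace/join multi-pass pipeline by a single left-to-right
-- scan with a 3-state mode machine (objective: alternative decomposition, same cost).

-- ===== PORT A =====

-- Python `c.isalnum() or c == "_"`; Char.isAlphanum is exact on the ASCII domain.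
def pvIsWord (c : Char) : Bool := c.isAlphanum || c == '_'

-- str.replace('"', '`') applied characterwise (exact: both arguments are single chars)
def pvRepl (c : Char) : Char := if c = '"' then '`' else c

-- the `for i in range(0, len(parts), 2)` loop: apply f to the even-indexed parts
def pvMapEven (f : List Char → List Char) : List (List Char) → List (List Char)
  | [] => []
  | [p] => [f p]
  | p :: q :: rest => f p :: q :: pvMapEven f rest

-- _normalize_identifiers
def pvNormalize (l : List Char) : List Char :=
  if l.isEmpty || !l.contains '"' then l
  else List.intercalate ['\''] (pvMapEven (List.map pvRepl) (l.splitOn '\''))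

-- __escape_at_identifiers_segment; `segment.find("`", i+1)` ported as
-- takeWhile/dropWhile on the remainder (exact: find-then-slice on the suffix)
def pvEscSeg : List Char → List Char
  | [] => []
  | c :: rest =>
    if c = '`' then
      '`' :: (rest.takeWhile (fun d => !(d == '`')) ++
        (if rest.dropWhile (fun d => !(d == '`')) = [] then []
           -- find returned -1: rest copied verbatim, the loop breaks
         else '`' :: pvEscSeg ((rest.dropWhile (fun d => !(d == '`'))).tail)))
    else if c = '@' then
      if rest.takeWhile pvIsWord = [] then c :: pvEscSeg rest
      else '`' :: c :: (rest.takeWhile pvIsWord ++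
        '`' :: pvEscSeg (rest.drop (rest.takeWhile pvIsWord).length))
    else c :: pvEscSeg rest
termination_by l => l.length
decreasing_by
  · have h1 : (rest.dropWhile (fun d => !(d == '`'))).length ≤ rest.length :=
      List.length_dropWhile_le _ _
    simp [List.length_tail]
    omega
  all_goals simp

def escape_at_identifiers_py (query : String) : String :=
  let l := query.toList
  if l.isEmpty || (!l.contains '@' && !l.contains '"') then query
  else
    String.ofList (List.intercalate ['\'']
      (pvMapEven pvEscSeg ((pvNormalize l).splitOn '\'')))

-- ===== PORT B =====

inductive PvMode : Type
  | norm | strm | tick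
deriving DecidableEq, Repr

-- the single scan of Source B: one pass, mode ∈ {normal, in-string, in-backtick-span}
def pvScan : PvMode → List Char → List Char
  | _, [] => []
  | .norm, c :: rest =>
    if c = '\'' then c :: pvScan .strm rest
    else if c = '"' ∨ c = '`' then '`' :: pvScan .tick rest
    else if c = '@' then
      if rest.takeWhile pvIsWord = [] then c :: pvScan .norm rest
      else '`' :: c :: (rest.takeWhile pvIsWord ++
        '`' :: pvScan .norm (rest.drop (rest.takeWhile pvIsWord).length))
    else c :: pvScan .norm rest
  | .strm, c :: rest => c :: pvScan (if c = '\'' then .norm else .strm) rest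
  | .tick, c :: rest =>
    if c = '\'' then c :: pvScan .strm rest
    else if c = '"' ∨ c = '`' then '`' :: pvScan .norm rest
    else c :: pvScan .tick rest
termination_by _ l => l.length
decreasing_by
  all_goals simp

def escape_at_identifiers_py_alt (query : String) : String :=
  let l := query.toList
  if l.isEmpty || (!l.contains '@' && !l.contains '"') then query
  else String.ofList (pvScan .norm l)

-- ===== PRECONDITION & SPEC =====
def Spec_escape_at_identifiers_py (query : String) (out : String) : Prop := out = escape_at_identifiers_py_alt query
instance (query : String) (out : String) : Decidable (Spec_escape_at_identifiers_py query out) := by unfold Spec_escape_at_identifiers_py; infer_instance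

-- ===== CLAIM (what is proved, stated in full; the proofs are below) =====
def Claim_equal_escape_at_identifiers_py : Prop := ∀ (query : String), Dom_escape_at_identifiers_py query → Spec_escape_at_identifiers_py query (escape_at_identifiers_py query)

-- ===== LEMMAS AND PROOFS =====

theorem pvRepl_quote_iff (c : Char) : pvRepl c = '\'' ↔ c = '\'' := by
  unfold pvRepl; split <;> simp_all

theorem pvRepl_backtick_iff (c : Char) : pvRepl c = '`' ↔ (c = '`' ∨ c = '"') := by
  unfold pvRepl; split <;> simp_all

theorem pvIsWord_repl (c : Char) : pvIsWord (pvRepl c) = pvIsWord c := by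
  unfold pvRepl; split <;> simp_all [pvIsWord]

theorem pv_takeWhile_append_cons {p : Char → Bool} (s : List Char) {c : Char} {t : List Char}
    (hc : p c = false) : (s ++ c :: t).takeWhile p = s.takeWhile p := by
  induction s with
  | nil => simp [List.takeWhile, hc]
  | cons a s ih => simp [List.takeWhile]; split <;> simp_all

theorem pv_takeWhile_map_repl {p q : Char → Bool} (h : ∀ c, p (pvRepl c) = q c) (l : List Char) :
    (l.map pvRepl).takeWhile p = (l.takeWhile q).map pvRepl := by
  induction l with
  | nil => simp
  | cons a l ih => simp [List.takeWhile, h a]; split <;> simp_all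

theorem pv_map_repl_id {l : List Char} (h : '"' ∉ l) : l.map pvRepl = l := by
  induction l with
  | nil => simp
  | cons a l ih =>
    simp_all [pvRepl]
    intro hq; exact absurd hq.symm h.1

theorem pv_splitOn_not_mem (x : Char) (l : List Char) : ∀ p ∈ l.splitOn x, x ∉ p := by
  induction l with
  | nil => intro p hp; simp [List.splitOn] at hp; simp [hp]
  | cons c l ih =>
    intro p hp
    rw [List.splitOn, List.splitOnP_cons] at hp
    by_cases hc : c = x
    · rw [if_pos (by simpa using hc)] at hp
      rcases List.mem_cons.mp hp with h1 | h2
      · simp [h1]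
      · exact ih p (by simpa [List.splitOn] using h2)
    · rw [if_neg (by simpa using hc)] at hp
      obtain ⟨h, t, hht⟩ := List.exists_cons_of_ne_nil (List.splitOnP_ne_nil (· == x) l)
      rw [hht, List.modifyHead_cons] at hp
      rcases List.mem_cons.mp hp with h1 | h2
      · subst h1
        have hxh : x ∉ h := ih h (by rw [List.splitOn, hht]; simp)
        simp only [List.mem_cons, not_or]
        exact ⟨fun hh => hc hh.symm, hxh⟩
      · exact ih p (by rw [List.splitOn, hht]; simp [h2])

theorem pv_splitOn_mem_mem (x : Char) (l : List Char) :
    ∀ p ∈ l.splitOn x, ∀ c ∈ p, c ∈ l := by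
  induction l with
  | nil => intro p hp; simp [List.splitOn] at hp; simp [hp]
  | cons c l ih =>
    intro p hp d hd
    rw [List.splitOn, List.splitOnP_cons] at hp
    by_cases hc : c = x
    · rw [if_pos (by simpa using hc)] at hp
      rcases List.mem_cons.mp hp with h1 | h2
      · subst h1; simp at hd
      · exact List.mem_cons_of_mem c (ih p (by simpa [List.splitOn] using h2) d hd)
    · rw [if_neg (by simpa using hc)] at hp
      obtain ⟨h, t, hht⟩ := List.exists_cons_of_ne_nil (List.splitOnP_ne_nil (· == x) l)
      rw [hht, List.modifyHead_cons] at hp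
      rcases List.mem_cons.mp hp with h1 | h2
      · subst h1
        rcases List.mem_cons.mp hd with h1 | h2
        · simp [h1]
        · exact List.mem_cons_of_mem c (ih h (by rw [List.splitOn, hht]; simp) d h2)
      · exact List.mem_cons_of_mem c (ih p (by rw [List.splitOn, hht]; simp [h2]) d hd)

theorem pv_mapEven_ne_nil (f : List Char → List Char) (ps : List (List Char)) (h : ps ≠ []) :
    pvMapEven f ps ≠ [] := by
  match ps with
  | [p] => simp [pvMapEven]
  | p :: q :: rest => simp [pvMapEven]

theorem pv_mapEven_mapEven (f g : List Char → List Char) :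
    ∀ ps : List (List Char), pvMapEven f (pvMapEven g ps) = pvMapEven (fun p => f (g p)) ps
  | [] => by simp [pvMapEven]
  | [p] => by simp [pvMapEven]
  | p :: q :: rest => by
    simp only [pvMapEven]
    rw [pv_mapEven_mapEven f g rest]

theorem pv_mapEven_congr (f g : List Char → List Char) :
    ∀ ps : List (List Char), (∀ p ∈ ps, f p = g p) → pvMapEven f ps = pvMapEven g ps
  | [], _ => by simp [pvMapEven]
  | [p], h => by simp [pvMapEven, h p (by simp)]
  | p :: q :: rest, h => by
    simp only [pvMapEven]
    rw [h p (by simp), pv_mapEven_congr f g rest (fun r hr => h r (by simp [hr]))]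

theorem pv_mem_mapEven (f : List Char → List Char) :
    ∀ ps : List (List Char), ∀ q ∈ pvMapEven f ps, (∃ p ∈ ps, q = f p) ∨ q ∈ ps
  | [], q, hq => by simp [pvMapEven] at hq
  | [p], q, hq => by
    simp [pvMapEven] at hq
    exact Or.inl ⟨p, by simp, hq⟩
  | p :: a :: rest, q, hq => by
    rcases List.mem_cons.mp hq with h1 | h2
    · exact Or.inl ⟨p, by simp, h1⟩
    · rcases List.mem_cons.mp h2 with h3 | h4
      · exact Or.inr (by simp [h3])
      · rcases pv_mem_mapEven f rest q h4 with ⟨r, hr, he⟩ | hm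
        · exact Or.inl ⟨r, by simp [hr], he⟩
        · exact Or.inr (by simp [hm])

theorem pv_intercalate_single (x : Char) (a : List Char) :
    List.intercalate [x] [a] = a := by
  simp [List.intercalate]

theorem pv_intercalate_cons₂ (x : Char) (a b : List Char) (l : List (List Char)) :
    List.intercalate [x] (a :: b :: l) = a ++ x :: List.intercalate [x] (b :: l) := by
  simp [List.intercalate]

def pvTailIn : Option (List Char) → List Char
  | none => []
  | some k => '\'' :: k

def pvTailOut : Option (List Char) → List Char
  | none => []
  | some k => '\'' :: pvScan .strm k

theorem pvStrm (q : List Char) (h : '\'' ∉ q) :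
    (∀ k, pvScan .strm (q ++ '\'' :: k) = q ++ '\'' :: pvScan .norm k) ∧
      pvScan .strm q = q := by
  induction q with
  | nil => exact ⟨fun k => by simp [pvScan], by simp [pvScan]⟩
  | cons c q ih =>
    simp only [List.mem_cons, not_or] at h
    obtain ⟨hc, hq⟩ := h
    obtain ⟨ih1, ih2⟩ := ih hq
    have hc' : ¬ c = '\'' := fun hh => hc hh.symm
    constructor
    · intro k
      simp only [List.cons_append, pvScan, if_neg hc']
      rw [ih1 k]
    · simp only [pvScan, if_neg hc']
      rw [ih2]

theorem pvEscSeg_shift {c : Char} (hc : ¬ c = '`') (xs : List Char) :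
    ∃ X, pvEscSeg ('`' :: xs) = '`' :: X ∧ pvEscSeg ('`' :: c :: xs) = '`' :: c :: X := by
  refine ⟨xs.takeWhile (fun d => !(d == '`')) ++
    (if xs.dropWhile (fun d => !(d == '`')) = [] then []
     else '`' :: pvEscSeg ((xs.dropWhile (fun d => !(d == '`'))).tail)), ?_, ?_⟩
  · simp [pvEscSeg]
  · simp [pvEscSeg, hc]

theorem pvSegNil (co : Option (List Char)) :
    pvScan .norm (pvTailIn co) = pvEscSeg [] ++ pvTailOut co ∧
      '`' :: pvScan .tick (pvTailIn co) = pvEscSeg ['`'] ++ pvTailOut co := by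
  cases co <;> simp [pvTailIn, pvTailOut, pvScan, pvEscSeg]

theorem pvSeg (co : Option (List Char)) :
    ∀ (n : ℕ) (seg : List Char), seg.length ≤ n → '\'' ∉ seg →
      pvScan .norm (seg ++ pvTailIn co) = pvEscSeg (seg.map pvRepl) ++ pvTailOut co ∧
        '`' :: pvScan .tick (seg ++ pvTailIn co) =
          pvEscSeg ('`' :: seg.map pvRepl) ++ pvTailOut co := by
  intro n
  induction n with
  | zero =>
    intro seg hl _
    have hseg : seg = [] := List.length_eq_zero_iff.mp (Nat.le_zero.mp hl)
    subst hseg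
    exact pvSegNil co
  | succ n ih =>
    intro seg hl hf
    cases seg with
    | nil => exact pvSegNil co
    | cons c s =>
      obtain ⟨hc, hs⟩ : ¬ ('\'' = c) ∧ '\'' ∉ s := by
        simpa [List.mem_cons, not_or] using hf
      have hc' : ¬ c = '\'' := fun hh => hc hh.symm
      have hslen : s.length ≤ n := by simpa using hl
      constructor
      · -- norm conjunct
        simp only [List.cons_append, pvScan, if_neg hc']
        by_cases hq : c = '"' ∨ c = '`'
        · rw [if_pos hq]
          have hrc : pvRepl c = '`' := (pvRepl_backtick_iff c).mpr (Or.symm hq)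
          simp only [List.map_cons, hrc]
          exact (ih s hslen hs).2
        · rw [if_neg hq]
          push Not at hq
          obtain ⟨hq1, hq2⟩ := hq
          have hrc : pvRepl c = c := by simp [pvRepl, hq1]
          simp only [List.map_cons, hrc]
          by_cases ha : c = '@'
          · subst ha
            rw [if_pos rfl]
            have hT : (s ++ pvTailIn co).takeWhile pvIsWord = s.takeWhile pvIsWord := by
              cases co
              · simp [pvTailIn]
              · exact pv_takeWhile_append_cons s (by decide)
            rw [hT]
            have hmap : (s.map pvRepl).takeWhile pvIsWord
                = (s.takeWhile pvIsWord).map pvRepl :=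
              pv_takeWhile_map_repl pvIsWord_repl s
            have hwid : (s.takeWhile pvIsWord).map pvRepl = s.takeWhile pvIsWord := by
              apply pv_map_repl_id
              intro hmem
              have := List.mem_takeWhile_imp hmem
              simp [pvIsWord] at this
            by_cases h0 : s.takeWhile pvIsWord = []
            · rw [if_pos h0]
              have h0' : (s.map pvRepl).takeWhile pvIsWord = [] := by
                rw [hmap, h0]; rfl
              simp only [pvEscSeg, h0', reduceIte]
              rw [(ih s hslen hs).1]
              simp
            · rw [if_neg h0]
              have h0' : ¬ (s.map pvRepl).takeWhile pvIsWord = [] := by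
                rw [hmap, hwid]; exact h0
              have hwlen : (s.takeWhile pvIsWord).length ≤ s.length :=
                (List.takeWhile_sublist _).length_le
              rw [List.drop_append_of_le_length hwlen]
              have hdrop : '\'' ∉ s.drop (s.takeWhile pvIsWord).length :=
                fun m => hs (List.mem_of_mem_drop m)
              have hdlen : (s.drop (s.takeWhile pvIsWord).length).length ≤ n := by
                have := List.length_drop (l := s) (i := (s.takeWhile pvIsWord).length)
                omega
              have hrec := (ih (s.drop (s.takeWhile pvIsWord).length) hdlen hdrop).1
              simp only [pvEscSeg, if_neg h0', reduceIte]
              rw [hmap, hwid, ← List.map_drop, hrec]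
              simp
          · rw [if_neg ha]
            simp only [pvEscSeg, if_neg hq2, if_neg ha]
            rw [(ih s hslen hs).1]
            simp
      · -- tick conjunct
        simp only [List.cons_append, pvScan, if_neg hc']
        by_cases hq : c = '"' ∨ c = '`'
        · rw [if_pos hq]
          have hrc : pvRepl c = '`' := (pvRepl_backtick_iff c).mpr (Or.symm hq)
          simp only [List.map_cons, hrc]
          have hn := (ih s hslen hs).1
          simp only [pvEscSeg, List.takeWhile_cons, List.dropWhile_cons]
          simp only [beq_self_eq_true, Bool.not_true, reduceIte]
          rw [hn]
          simp
        · rw [if_neg hq]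
          push Not at hq
          obtain ⟨hq1, hq2⟩ := hq
          have hrc : pvRepl c = c := by simp [pvRepl, hq1]
          simp only [List.map_cons, hrc]
          obtain ⟨X, hX1, hX2⟩ := pvEscSeg_shift hq2 (s.map pvRepl)
          rw [hX2]
          have ht := (ih s hslen hs).2
          rw [hX1] at ht
          have ht' : pvScan .tick (s ++ pvTailIn co) = X ++ pvTailOut co := by
            have := ht
            simpa using this
          rw [ht']
          simp

theorem pvParts : ∀ (ps : List (List Char)), ps ≠ [] → (∀ p ∈ ps, '\'' ∉ p) →
    pvScan .norm (List.intercalate ['\''] ps)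
      = List.intercalate ['\''] (pvMapEven (fun p => pvEscSeg (p.map pvRepl)) ps)
  | [p], _, hf => by
    rw [pv_intercalate_single]
    have := (pvSeg none p.length p (le_refl _) (hf p (by simp))).1
    simp only [pvTailIn, pvTailOut, List.append_nil] at this
    rw [this]
    simp only [pvMapEven]
    rw [pv_intercalate_single]
  | [p, q], _, hf => by
    rw [pv_intercalate_cons₂, pv_intercalate_single]
    have h1 := (pvSeg (some q) p.length p (le_refl _) (hf p (by simp))).1
    simp only [pvTailIn, pvTailOut] at h1
    rw [h1, (pvStrm q (hf q (by simp))).2]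
    simp only [pvMapEven]
    rw [pv_intercalate_cons₂, pv_intercalate_single]
  | p :: q :: r :: t, _, hf => by
    rw [pv_intercalate_cons₂, pv_intercalate_cons₂]
    have h1 := (pvSeg (some (q ++ '\'' :: List.intercalate ['\''] (r :: t)))
      p.length p (le_refl _) (hf p (by simp))).1
    simp only [pvTailIn, pvTailOut] at h1
    rw [h1, (pvStrm q (hf q (by simp))).1]
    rw [pvParts (r :: t) (by simp) (fun s hs => hf s (by simp [List.mem_cons] at hs ⊢; tauto))]
    obtain ⟨m, ms, hm⟩ := List.exists_cons_of_ne_nil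
      (pv_mapEven_ne_nil (fun p => pvEscSeg (p.map pvRepl)) (r :: t) (by simp))
    simp only [pvMapEven]
    rw [hm, pv_intercalate_cons₂, pv_intercalate_cons₂]

theorem pv_main : ∀ (query : String),
    escape_at_identifiers_py query = escape_at_identifiers_py_alt query := by
  intro query
  unfold escape_at_identifiers_py escape_at_identifiers_py_alt
  by_cases hg : (query.toList.isEmpty
      || (!query.toList.contains '@' && !query.toList.contains '"')) = true
  · rw [if_pos hg, if_pos hg]
  · rw [if_neg hg, if_neg hg]
    congr 1
    have hfree : ∀ p ∈ query.toList.splitOn '\'', '\'' ∉ p :=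
      pv_splitOn_not_mem '\'' query.toList
    have hne : query.toList.splitOn '\'' ≠ [] := by
      rw [List.splitOn]; exact List.splitOnP_ne_nil _ _
    have hl : List.intercalate ['\''] (query.toList.splitOn '\'') = query.toList :=
      List.intercalate_splitOn (xs := query.toList) '\''
    unfold pvNormalize
    by_cases hq : (query.toList.isEmpty || !query.toList.contains '"') = true
    · rw [if_pos hq]
      have hnil : query.toList.isEmpty = false := by
        cases h : query.toList.isEmpty
        · rfl
        · exact absurd (by rw [h]; rfl) hg
      have hnq : '"' ∉ query.toList := by
        simp [hnil] at hq
        simpa using hq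
      have := pvParts (query.toList.splitOn '\'') hne hfree
      rw [hl] at this
      rw [this]
      apply congrArg
      apply pv_mapEven_congr
      intro p hp
      rw [pv_map_repl_id (fun hm => hnq (pv_splitOn_mem_mem '\'' query.toList p hp '"' hm))]
    · rw [if_neg hq]
      have hfree2 : ∀ q ∈ pvMapEven (List.map pvRepl) (query.toList.splitOn '\''),
          '\'' ∉ q := by
        intro q hq2 hmem
        rcases pv_mem_mapEven (List.map pvRepl) (query.toList.splitOn '\'') q hq2 with
          ⟨p, hp, he⟩ | hm
        · subst he
          obtain ⟨c, hcp, hce⟩ := List.mem_map.mp hmem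
          exact hfree p hp (((pvRepl_quote_iff c).mp hce) ▸ hcp)
        · exact hfree q hm hmem
      have hne2 : pvMapEven (List.map pvRepl) (query.toList.splitOn '\'') ≠ [] :=
        pv_mapEven_ne_nil _ _ hne
      rw [List.splitOn_intercalate (ls := pvMapEven (List.map pvRepl) (query.toList.splitOn '\'')) '\'' hfree2 hne2]
      rw [pv_mapEven_mapEven]
      have := pvParts (query.toList.splitOn '\'') hne hfree
      rw [hl] at this
      rw [this]

-- ===== VERDICT (by name: the statement is the Claim_ definition above) =====
theorem escape_at_identifiers_py_spec : Claim_equal_escape_at_identifiers_py := by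
  intro q _
  unfold Spec_escape_at_identifiers_py
  exact pv_main q
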